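-- pv_equiv track=rewrite | github.com/AEArslanXX/sudoku_cozucu | main.py | boxs
-- ===== SOURCE A (Python) =====
-- board = [
--     [5, 3, 0, 0, 7, 0, 0, 0, 0],
--     [6, 0, 0, 1, 9, 5, 0, 0, 0],
--     [0, 9, 8, 0, 0, 0, 0, 6, 0],
--     [8, 0, 0, 0, 6, 0, 0, 0, 3],
--     [4, 0, 0, 8, 0, 3, 0, 0, 1],
--     [7, 0, 0, 0, 2, 0, 0, 0, 6],
--     [0, 6, 0, 0, 0, 0, 2, 8, 0],
--     [0, 0, 0, 4, 1, 9, 0, 0, 5],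
--     [0, 0, 0, 0, 8, 0, 0, 7, 9]
-- ]
--
-- def rows(n):
--     if n > 9:
--         return False
--     n -= 1
--     return board[n]
--
-- def boxs(n):
--
--     a = 0
--     row_num = range(0)
--     if n > 9:
--         return False
--     elif n == 1:
--         a, row_num = 0, range(1,4)
--     elif n == 2:
--         a, row_num = 3, range(1,4)
--     elif n == 3:
--         a, row_num = 6, range(1,4)
--     elif n == 4:
--         a, row_num = 0, range(4,7)
--     elif n == 5:
--         a, row_num = 3, range(4,7)
--     elif n == 6:
--         a, row_num = 6, range(4,7)
--     elif n == 7: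
--         a, row_num = 0, range(7,10)
--     elif n == 8:
--         a, row_num = 3, range(7,10)
--     elif n == 9:
--         a, row_num = 6, range(7,10)
--
--     box_data = []
--     for i in row_num:
--         box_data.extend(rows(i)[a:a+3])
--     return box_data
-- ===== SOURCE B (Python) =====
-- board = [
--     [5, 3, 0, 0, 7, 0, 0, 0, 0],
--     [6, 0, 0, 1, 9, 5, 0, 0, 0],
--     [0, 9, 8, 0, 0, 0, 0, 6, 0],
--     [8, 0, 0, 0, 6, 0, 0, 0, 3],
--     [4, 0, 0, 8, 0, 3, 0, 0, 1],
--     [7, 0, 0, 0, 2, 0, 0, 0, 6],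
--     [0, 6, 0, 0, 0, 0, 2, 8, 0],
--     [0, 0, 0, 4, 1, 9, 0, 0, 5],
--     [0, 0, 0, 0, 8, 0, 0, 7, 9]
-- ]
--
-- def boxs(n):
--     if not (1 <= n <= 9):
--         return []
--     k = int(n) - 1
--     r, c = (k // 3) * 3, (k % 3) * 3
--     return [board[r + i][c + j] for i in range(3) for j in range(3)]
-- ===== Notes on version B (the rewrite author's own statement) =====
-- stated objective: simpler
-- what changed: Replaces the 9-way if/elif table and a loop calling rows() with slicing by closed-form box offsets r=((n-1)//3)*3, c=((n-1)%3)*3 and one comprehension over the 3x3 cells.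
-- outside the precondition, e.g. on boxs(10): A returns False, B returns []
import Mathlib
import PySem

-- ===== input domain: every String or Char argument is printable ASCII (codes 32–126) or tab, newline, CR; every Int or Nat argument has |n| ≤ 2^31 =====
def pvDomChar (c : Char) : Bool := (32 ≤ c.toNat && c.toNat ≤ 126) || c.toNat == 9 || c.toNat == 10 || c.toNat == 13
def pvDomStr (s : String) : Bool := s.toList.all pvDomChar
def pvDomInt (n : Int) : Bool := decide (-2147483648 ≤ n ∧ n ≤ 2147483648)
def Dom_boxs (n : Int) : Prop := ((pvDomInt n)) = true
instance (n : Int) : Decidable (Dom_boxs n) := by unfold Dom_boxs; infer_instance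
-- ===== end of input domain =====

-- B replaces A's 9-way if/elif offset table and rows()-slicing loop by closed-form
-- box offsets ((n-1)//3)*3, ((n-1)%3)*3 and a single 3x3 comprehension (objective: simpler).

-- ===== PORT A =====
def pvBoard : List (List Int) := [
  [5, 3, 0, 0, 7, 0, 0, 0, 0],
  [6, 0, 0, 1, 9, 5, 0, 0, 0],
  [0, 9, 8, 0, 0, 0, 0, 6, 0],
  [8, 0, 0, 0, 6, 0, 0, 0, 3],
  [4, 0, 0, 8, 0, 3, 0, 0, 1],
  [7, 0, 0, 0, 2, 0, 0, 0, 6],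
  [0, 6, 0, 0, 0, 0, 2, 8, 0],
  [0, 0, 0, 4, 1, 9, 0, 0, 5],
  [0, 0, 0, 0, 8, 0, 0, 7, 9]]

-- rows(n): for n ≤ 9 returns board[n-1] (boxs only calls it with n ∈ 1..9, always in range);
-- its n > 9 'return False' branch is unreachable from boxs and not modelled.
def rowsA (n : Int) : List Int := PySem.List.pyGetD pvBoard (n - 1) []

def boxs (n : Int) : List Int :=
  if n > 9 then []  -- Python returns False here (not a list); excluded by Pre_boxs
  else
    let p : Int × List Int :=
      if n = 1 then (0, PySem.List.pyRange 1 4 1)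
      else if n = 2 then (3, PySem.List.pyRange 1 4 1)
      else if n = 3 then (6, PySem.List.pyRange 1 4 1)
      else if n = 4 then (0, PySem.List.pyRange 4 7 1)
      else if n = 5 then (3, PySem.List.pyRange 4 7 1)
      else if n = 6 then (6, PySem.List.pyRange 4 7 1)
      else if n = 7 then (0, PySem.List.pyRange 7 10 1)
      else if n = 8 then (3, PySem.List.pyRange 7 10 1)
      else if n = 9 then (6, PySem.List.pyRange 7 10 1)
      else (0, PySem.List.pyRange 0 0 1)
    p.2.foldl (fun acc i => acc ++ PySem.List.slice (rowsA i) (some p.1) (some (p.1 + 3))) []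

-- ===== PORT B =====
def boxs_alt (n : Int) : List Int :=
  if ¬ (1 ≤ n ∧ n ≤ 9) then []
  else
    let k := n - 1
    let r := PySem.Int.floordiv k 3 * 3
    let c := PySem.Int.mod k 3 * 3
    (PySem.List.pyRange 0 3 1).flatMap (fun i =>
      (PySem.List.pyRange 0 3 1).map (fun j =>
        PySem.List.pyGetD (PySem.List.pyGetD pvBoard (r + i) []) (c + j) 0))

-- ===== PRECONDITION & SPEC =====
-- Pre_ excludes n > 9, where A returns the bool False instead of a list (not a value of the declared type).
def Pre_boxs (n : Int) : Prop := n ≤ 9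
instance (n : Int) : Decidable (Pre_boxs n) := by unfold Pre_boxs; infer_instance
def pvWitness_boxs : Int := 5
def Spec_boxs (n : Int) (out : List Int) : Prop := out = boxs_alt n
instance (n : Int) (out : List Int) : Decidable (Spec_boxs n out) := by unfold Spec_boxs; infer_instance

-- ===== CLAIM (what is proved, stated in full; the proofs are below) =====
def Claim_equal_boxs : Prop := ∀ (n : Int), Dom_boxs n → Pre_boxs n → Spec_boxs n (boxs n)

-- ===== LEMMAS AND PROOFS =====
theorem boxs_eq_of_out (n : Int) (h9 : n ≤ 9) (h : ¬ (1 ≤ n ∧ n ≤ 9)) :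
    boxs n = boxs_alt n := by
  have h1 : n ≠ 1 := by omega
  have h2 : n ≠ 2 := by omega
  have h3 : n ≠ 3 := by omega
  have h4 : n ≠ 4 := by omega
  have h5 : n ≠ 5 := by omega
  have h6 : n ≠ 6 := by omega
  have h7 : n ≠ 7 := by omega
  have h8 : n ≠ 8 := by omega
  have h9' : n ≠ 9 := by omega
  have hle : ¬ n > 9 := by omega
  simp [boxs, boxs_alt, h1, h2, h3, h4, h5, h6, h7, h8, h9', hle, h, PySem.List.pyRange]

-- ===== VERDICT (by name: the statement is the Claim_ definition above) =====
theorem boxs_spec : Claim_equal_boxs := by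
  intro n _ hpre
  unfold Spec_boxs
  by_cases e1 : n = 1; · subst e1; decide
  by_cases e2 : n = 2; · subst e2; decide
  by_cases e3 : n = 3; · subst e3; decide
  by_cases e4 : n = 4; · subst e4; decide
  by_cases e5 : n = 5; · subst e5; decide
  by_cases e6 : n = 6; · subst e6; decide
  by_cases e7 : n = 7; · subst e7; decide
  by_cases e8 : n = 8; · subst e8; decide
  by_cases e9 : n = 9; · subst e9; decide
  exact boxs_eq_of_out n hpre (by omega)
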